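-- pv_equiv track=rewrite | github.com/DavidRmwes/LADtoST | l5x_lad2st.py | _l5k_unescape_comment
-- ===== SOURCE A (Python) =====
-- def _l5k_unescape_comment(raw: str) -> str:
--     s = raw
--     s = s.replace("$N", "\n")
--     s = s.replace("$Q", '"')
--     s = s.replace("$'", "'")
--     s = s.replace("$$", "$")
--     s = s.replace("$R", "\r")
--     s = s.replace("$T", "\t")
--     lines = s.split("\n")
--     cleaned = []
--     for line in lines:
--         if line.strip() == "" and cleaned and cleaned[-1].strip() == "":
--             continue
--         cleaned.append(line)
--     while cleaned and cleaned[-1].strip() == "":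
--         cleaned.pop()
--     return "\n".join(cleaned)
-- ===== SOURCE B (Python) =====
-- def _l5k_unescape_comment(raw: str) -> str:
--     s = raw
--     for pat, rep in (("$N", "\n"), ("$Q", '"'), ("$'", "'"),
--                      ("$$", "$"), ("$R", "\r"), ("$T", "\t")):
--         s = s.replace(pat, rep)
--     lines = s.split("\n")
--     # Run-length grouping: split the lines into maximal runs of equal blankness.
--     runs = []
--     for line in lines:
--         blank = line.strip() == ""
--         if runs and runs[-1][0] == blank:
--             runs[-1][1].append(line)
--         else:
--             runs.append((blank, [line]))
--     # A trailing blank run disappears entirely; every other blank run keeps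
--     # only its first line; non-blank runs are kept verbatim.
--     if runs and runs[-1][0]:
--         runs.pop()
--     out = []
--     for blank, run in runs:
--         out.extend(run[:1] if blank else run)
--     return "\n".join(out)
-- ===== Notes on version B (the rewrite author's own statement) =====
-- stated objective: alternative
-- what changed: A's stateful loop (checking the previously kept line) plus while-pop is replaced by run-length grouping: lines are grouped into maximal runs of equal blankness, a trailing blank run is dropped as a whole group, every other blank run contributes only its first line, non-blank runs are kept verbatim.
import Mathlib
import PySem

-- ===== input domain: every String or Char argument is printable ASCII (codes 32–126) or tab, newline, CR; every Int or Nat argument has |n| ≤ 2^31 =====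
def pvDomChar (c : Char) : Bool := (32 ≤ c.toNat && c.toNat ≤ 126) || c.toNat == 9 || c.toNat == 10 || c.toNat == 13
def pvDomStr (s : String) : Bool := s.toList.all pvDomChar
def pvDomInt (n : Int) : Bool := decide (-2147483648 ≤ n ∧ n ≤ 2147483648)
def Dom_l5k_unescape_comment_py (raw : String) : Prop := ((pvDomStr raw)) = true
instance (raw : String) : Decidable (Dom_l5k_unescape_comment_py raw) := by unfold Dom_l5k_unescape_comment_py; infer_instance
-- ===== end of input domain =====

-- B replaces A's stateful previous-kept-line loop and while-pop by run-length grouping: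
-- lines are grouped into maximal runs of equal blankness, a trailing blank run is dropped
-- as a group, every other blank run keeps only its first line; objective: alternative.

-- ===== PORT A =====
-- 'while cleaned and cleaned[-1].strip() == "": cleaned.pop()'
def pvPopTrailing (xs : List String) : List String :=
  if h : xs = [] then xs
  else if PySem.Str.strip (xs.getLast h) == "" then pvPopTrailing xs.dropLast else xs
termination_by xs.length
decreasing_by
  have : 0 < xs.length := List.length_pos_iff.mpr h
  simp [List.length_dropLast]; omega

def l5k_unescape_comment_py (raw : String) : String :=
  let s := PySem.Str.replace raw "$N" "\n"
  let s := PySem.Str.replace s "$Q" "\""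
  let s := PySem.Str.replace s "$'" "'"
  let s := PySem.Str.replace s "$$" "$"
  let s := PySem.Str.replace s "$R" "\r"
  let s := PySem.Str.replace s "$T" "\t"
  let lines := (PySem.Str.split? s "\n").getD []
  let cleaned := lines.foldl (fun cleaned line =>
    if PySem.Str.strip line == "" && !cleaned.isEmpty &&
        (match cleaned.getLast? with
         | some p => PySem.Str.strip p == ""
         | none => false) then cleaned
    else cleaned ++ [line]) []
  let cleaned := pvPopTrailing cleaned
  PySem.Str.join "\n" cleaned

-- ===== PORT B =====
-- 'if runs and runs[-1][0] == blank: runs[-1][1].append(line) else: runs.append((blank, [line]))'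
def pvStepB (runs : List (Bool × List String)) (line : String) : List (Bool × List String) :=
  let blank := PySem.Str.strip line == ""
  match runs.getLast? with
  | some (b, run) =>
      if b == blank then runs.dropLast ++ [(b, run ++ [line])]
      else runs ++ [(blank, [line])]
  | none => runs ++ [(blank, [line])]

def l5k_unescape_comment_py_alt (raw : String) : String :=
  -- 'for pat, rep in ((…)): s = s.replace(pat, rep)'
  let s := [("$N", "\n"), ("$Q", "\""), ("$'", "'"),
            ("$$", "$"), ("$R", "\r"), ("$T", "\t")].foldl
             (fun s pr => PySem.Str.replace s pr.1 pr.2) raw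
  let lines := (PySem.Str.split? s "\n").getD []
  let runs := lines.foldl pvStepB []
  -- 'if runs and runs[-1][0]: runs.pop()'
  let runs := match runs.getLast? with
    | some (true, _) => runs.dropLast
    | _ => runs
  -- 'for blank, run in runs: out.extend(run[:1] if blank else run)'
  let out := runs.foldl (fun out g => out ++ (if g.1 then g.2.take 1 else g.2)) []
  PySem.Str.join "\n" out

-- ===== PRECONDITION & SPEC =====
def Spec_l5k_unescape_comment_py (raw : String) (out : String) : Prop := out = l5k_unescape_comment_py_alt raw
instance (raw : String) (out : String) : Decidable (Spec_l5k_unescape_comment_py raw out) := by unfold Spec_l5k_unescape_comment_py; infer_instance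

-- ===== CLAIM (what is proved, stated in full; the proofs are below) =====
def Claim_equal_l5k_unescape_comment_py : Prop := ∀ (raw : String), Dom_l5k_unescape_comment_py raw → Spec_l5k_unescape_comment_py raw (l5k_unescape_comment_py raw)

-- ===== LEMMAS AND PROOFS =====

def pvBlank (l : String) : Bool := PySem.Str.strip l == ""

def pvOptBlank : Option String → Bool
  | some p => pvBlank p
  | none => false

-- canonical collapse: skip a blank line when the pending 'last' line is blank
def pvColl (last : Option String) : List String → List String
  | [] => []
  | c :: rest =>
      if pvBlank c && pvOptBlank last
      then pvColl last rest
      else c :: pvColl (some c) rest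

lemma pvColl_cons (last : Option String) (c : String) (rest : List String) :
    pvColl last (c :: rest) =
      if pvBlank c && pvOptBlank last
      then pvColl last rest
      else c :: pvColl (some c) rest := rfl

lemma pvColl_foldA (lines : List String) : ∀ acc : List String,
    lines.foldl (fun cleaned line =>
      if PySem.Str.strip line == "" && !cleaned.isEmpty &&
          (match cleaned.getLast? with
           | some p => PySem.Str.strip p == ""
           | none => false) then cleaned
      else cleaned ++ [line]) acc = acc ++ pvColl acc.getLast? lines := by
  induction lines with
  | nil => intro acc; simp [pvColl]
  | cons c rest ih =>
    intro acc
    rw [List.foldl_cons]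
    by_cases hacc : acc = []
    · subst hacc
      simp only [List.isEmpty_nil, Bool.not_true, Bool.and_false, Bool.false_and,
        if_neg (by simp : ¬ (false = true))]
      rw [ih]
      rw [pvColl_cons, if_neg (by simp [pvOptBlank])]
      simp
    · have hne : acc.isEmpty = false := by simpa [List.isEmpty_iff] using hacc
      have hmatch : (match acc.getLast? with
           | some p => PySem.Str.strip p == ""
           | none => false) = pvOptBlank acc.getLast? := by
        cases acc.getLast? <;> rfl
      by_cases hb : (pvBlank c && pvOptBlank acc.getLast?) = true
      · have hb' : (PySem.Str.strip c == "" && !acc.isEmpty &&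
            (match acc.getLast? with
             | some p => PySem.Str.strip p == ""
             | none => false)) = true := by
          rw [hmatch, hne]
          simp only [pvBlank, Bool.and_eq_true] at hb ⊢
          exact ⟨⟨hb.1, rfl⟩, hb.2⟩
        rw [if_pos hb', ih acc, pvColl_cons, if_pos hb]
      · have hb' : ¬ (PySem.Str.strip c == "" && !acc.isEmpty &&
            (match acc.getLast? with
             | some p => PySem.Str.strip p == ""
             | none => false)) = true := by
          rw [hmatch, hne]
          simp only [pvBlank, Bool.and_eq_true] at hb ⊢
          intro h; exact hb ⟨h.1.1, h.2⟩
        rw [if_neg hb', ih (acc ++ [c]), pvColl_cons, if_neg hb]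
        simp

def pvCollapseRun (g : Bool × List String) : List String :=
  if g.1 then g.2.take 1 else g.2

def pvWf (G : List (Bool × List String)) : Prop :=
  (∀ g ∈ G, g.2 ≠ [] ∧ ∀ l ∈ g.2, pvBlank l = g.1) ∧
    List.IsChain (fun a b => a.1 ≠ b.1) G

lemma pvWf_nil : pvWf [] := ⟨by simp, List.isChain_nil⟩

lemma pvStepB_char (acc : List (Bool × List String)) (l : String) (h : pvWf acc) :
    pvWf (pvStepB acc l) ∧
      (pvStepB acc l).flatMap (·.2) = acc.flatMap (·.2) ++ [l] := by
  induction acc using List.reverseRecOn with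
  | nil =>
    refine ⟨⟨?_, ?_⟩, ?_⟩
    · simp [pvStepB, pvBlank]
    · simp [pvStepB]
    · simp [pvStepB]
  | append_singleton ys g _ =>
    obtain ⟨b, run⟩ := g
    have hlast : (ys ++ [(b, run)]).getLast? = some (b, run) := by simp
    obtain ⟨hhom, hch⟩ := h
    rw [List.isChain_append] at hch
    by_cases hb : b == pvBlank l
    · have hbv : pvBlank l = b := by simp at hb; exact hb.symm
      have hstep : pvStepB (ys ++ [(b, run)]) l = ys ++ [(b, run ++ [l])] := by
        simp only [pvStepB, hlast]
        rw [if_pos (by simpa [pvBlank] using hb)]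
        simp
      constructor
      · refine ⟨?_, ?_⟩
        · rw [hstep]
          intro g hg
          rcases List.mem_append.mp hg with hg | hg
          · exact hhom g (List.mem_append.mpr (Or.inl hg))
          · have hrun := hhom (b, run) (List.mem_append.mpr (Or.inr (by simp)))
            simp only [List.mem_singleton] at hg
            subst hg
            refine ⟨by simp, ?_⟩
            intro x hx
            rcases List.mem_append.mp hx with hx | hx
            · exact hrun.2 x hx
            · simp only [List.mem_singleton] at hx; subst hx; exact hbv
        · rw [hstep, List.isChain_append]
          exact ⟨hch.1, by simp, by simpa using hch.2.2⟩
      · rw [hstep]; simp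
    · have hstep : pvStepB (ys ++ [(b, run)]) l =
          (ys ++ [(b, run)]) ++ [(pvBlank l, [l])] := by
        simp only [pvStepB, hlast]
        rw [if_neg (by simpa [pvBlank] using hb)]
        rfl
      constructor
      · refine ⟨?_, ?_⟩
        · rw [hstep]
          intro g hg
          rcases List.mem_append.mp hg with hg | hg
          · exact hhom g hg
          · simp only [List.mem_singleton] at hg; subst hg
            exact ⟨by simp, by simp⟩
        · rw [hstep, List.isChain_append]
          refine ⟨List.isChain_append.mpr hch, by simp, ?_⟩
          intro x hx y hy
          simp only [hlast, Option.mem_def, Option.some.injEq] at hx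
          simp only [List.head?_cons, Option.mem_def, Option.some.injEq] at hy
          subst hx; subst hy
          simpa [eq_comm] using (by simpa using hb : ¬ b = pvBlank l)
      · rw [hstep]; simp

lemma pvFoldB_char (lines : List String) : ∀ acc, pvWf acc →
    pvWf (lines.foldl pvStepB acc) ∧
      (lines.foldl pvStepB acc).flatMap (·.2) = acc.flatMap (·.2) ++ lines := by
  induction lines with
  | nil => intro acc h; simpa using h
  | cons l rest ih =>
    intro acc h
    rw [List.foldl_cons]
    obtain ⟨h1, h2⟩ := pvStepB_char acc l h
    obtain ⟨h3, h4⟩ := ih _ h1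
    exact ⟨h3, by rw [h4, h2, List.append_assoc]; rfl⟩

-- a run of blank lines after a blank pending line is dropped entirely
lemma pvColl_blank_run (run : List String) : ∀ (last : Option String) (tail : List String),
    (∀ l ∈ run, pvBlank l = true) → pvOptBlank last = true →
    pvColl last (run ++ tail) = pvColl last tail := by
  induction run with
  | nil => intro last tail _ _; rfl
  | cons a rest ih =>
    intro last tail hall hlast
    rw [List.cons_append, pvColl_cons,
      if_pos (by simp [hall a (by simp), hlast])]
    exact ih last tail (fun l hl => hall l (by simp [hl])) hlast

-- a run of non-blank lines is kept verbatim
lemma pvColl_nonblank_run (run : List String) : ∀ (last : Option String) (tail : List String),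
    (∀ l ∈ run, pvBlank l = false) →
    pvColl last (run ++ tail) = run ++ pvColl (run.getLast?.or last) tail := by
  induction run with
  | nil => intro last tail _; simp
  | cons a rest ih =>
    intro last tail hall
    rw [List.cons_append, pvColl_cons,
      if_neg (by simp [hall a (by simp)])]
    rw [ih (some a) tail (fun l hl => hall l (by simp [hl]))]
    cases rest with
    | nil => simp
    | cons b bs =>
      have hx : (b :: bs).getLast? = some ((b :: bs).getLast (by simp)) :=
        List.getLast?_eq_some_getLast (by simp)
      simp [hx]

lemma pvRuns (G : List (Bool × List String)) : ∀ (last : Option String), pvWf G →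
    (∀ g, G.head? = some g → pvOptBlank last = true → g.1 = false) →
    pvColl last (G.flatMap (·.2)) = G.flatMap pvCollapseRun := by
  induction G with
  | nil => intro last _ _; rfl
  | cons g gs ih =>
    intro last hwf hhead
    obtain ⟨b, run⟩ := g
    obtain ⟨hwf1, hwf2⟩ := hwf
    have hrun := hwf1 (b, run) (by simp)
    have hch := List.isChain_cons.mp hwf2
    have ihwf : pvWf gs := ⟨fun g hg => hwf1 g (by simp [hg]), hch.2⟩
    have hnext : ∀ g, gs.head? = some g → g.1 ≠ b := by
      intro g hg
      have := hch.1 g hg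
      simpa [eq_comm] using this
    rw [List.flatMap_cons, List.flatMap_cons]
    cases hb : b with
    | true =>
      cases hrn : run with
      | nil => exact absurd hrn hrun.1
      | cons l rest =>
        have hl : pvBlank l = true := by
          have := hrun.2 l (by simp [hrn]); rw [this, hb]
        have hlastf : pvOptBlank last = false := by
          by_cases hx : pvOptBlank last = true
          · have := hhead (b, run) rfl hx; rw [hb] at this; exact absurd this (by simp)
          · simpa using hx
        rw [List.cons_append, pvColl_cons, if_neg (by simp [hlastf])]
        rw [pvColl_blank_run rest (some l) (gs.flatMap (·.2))
          (fun x hx => by have := hrun.2 x (by simp [hrn, hx]); rw [this, hb])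
          (by simpa [pvOptBlank] using hl)]
        rw [ih (some l) ihwf (fun g hg _ => by
          have := hnext g hg
          cases hgb : g.1 with
          | false => rfl
          | true => rw [hb] at this; exact absurd hgb this)]
        simp [pvCollapseRun]
    | false =>
      have hallf : ∀ l ∈ run, pvBlank l = false := by
        intro l hl; have := hrun.2 l hl; rw [this, hb]
      rw [pvColl_nonblank_run run last (gs.flatMap (·.2)) hallf]
      have hgl : ∃ x, run.getLast? = some x := by
        cases hrn : run with
        | nil => exact absurd hrn hrun.1
        | cons a as => exact ⟨(a :: as).getLast (by simp), List.getLast?_eq_some_getLast (by simp)⟩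
      obtain ⟨x, hx⟩ := hgl
      have hxb : pvBlank x = false := hallf x (List.mem_of_getLast? hx)
      rw [ih (run.getLast?.or last) ihwf (fun g hg hob => by
        exfalso
        rw [hx] at hob
        simp [pvOptBlank, hxb] at hob)]
      simp [pvCollapseRun]

lemma pvPop_nil : pvPopTrailing [] = [] := by unfold pvPopTrailing; simp

lemma pvPop_id (xs : List String)
    (h : ∀ a, xs.getLast? = some a → pvBlank a = false) : pvPopTrailing xs = xs := by
  unfold pvPopTrailing
  split
  · rfl
  · next hne =>
    have := h (xs.getLast hne) (List.getLast?_eq_some_getLast hne)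
    rw [if_neg (by simpa [pvBlank] using this)]

lemma pvPop_snoc_blank (xs : List String) (a : String) (ha : pvBlank a = true) :
    pvPopTrailing (xs ++ [a]) = pvPopTrailing xs := by
  conv_lhs => rw [pvPopTrailing]
  rw [dif_neg (by simp : ¬ (xs ++ [a] = []))]
  rw [List.getLast_concat, if_pos (by simpa [pvBlank] using ha), List.dropLast_concat]

lemma pvPop_runs (G : List (Bool × List String)) (hwf : pvWf G) :
    pvPopTrailing (G.flatMap pvCollapseRun) =
      (match G.getLast? with
        | some (true, _) => G.dropLast
        | _ => G).flatMap pvCollapseRun := by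
  induction G using List.reverseRecOn with
  | nil => simpa using pvPop_nil
  | append_singleton ys g _ =>
    obtain ⟨b, run⟩ := g
    obtain ⟨hhom, hch⟩ := hwf
    have hrun := hhom (b, run) (by simp)
    have hlast : (ys ++ [(b, run)]).getLast? = some (b, run) := by simp
    rw [List.isChain_append] at hch
    have hysid : pvPopTrailing (ys.flatMap pvCollapseRun) = ys.flatMap pvCollapseRun ∨ b = false := by
      cases hb : b with
      | false => exact Or.inr rfl
      | true =>
        left
        induction ys using List.reverseRecOn with
        | nil => simpa using pvPop_nil
        | append_singleton zs g' _ =>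
          obtain ⟨b', run'⟩ := g'
          have hb' : b' = false := by
            have := hch.2.2 (b', run') (by simp) (b, run) (by simp)
            simp only at this
            cases hbx : b' with
            | false => rfl
            | true => rw [hbx, hb] at this; exact absurd rfl this
          have hrun' := hhom (b', run') (by simp)
          apply pvPop_id
          intro a hma
          have hcoll : pvCollapseRun (b', run') = run' := by simp [pvCollapseRun, hb']
          rw [List.flatMap_append, List.flatMap_cons, List.flatMap_nil,
            List.append_nil, hcoll] at hma
          rw [List.getLast?_append_of_ne_nil _ hrun'.1] at hma
          have := hrun'.2 a (List.mem_of_getLast? hma)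
          rw [this, hb']
    rw [List.flatMap_append, List.flatMap_cons, List.flatMap_nil, List.append_nil, hlast]
    cases hb : b with
    | true =>
      cases hrn : run with
      | nil => exact absurd hrn hrun.1
      | cons l rest =>
        have hl : pvBlank l = true := by
          have := hrun.2 l (by simp [hrn]); rw [this, hb]
        have hcoll : pvCollapseRun (true, l :: rest) = [l] := by simp [pvCollapseRun]
        rw [hcoll, pvPop_snoc_blank _ l hl]
        simp only [List.dropLast_concat]
        rcases hysid with hid | hbf
        · exact hid
        · rw [hb] at hbf; exact absurd hbf (by simp)
    | false =>
      have hgl : ∃ x, run.getLast? = some x := by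
        cases hrn : run with
        | nil => exact absurd hrn hrun.1
        | cons a as => exact ⟨(a :: as).getLast (by simp), List.getLast?_eq_some_getLast (by simp)⟩
      obtain ⟨x, hx⟩ := hgl
      have hcoll : pvCollapseRun (false, run) = run := by simp [pvCollapseRun]
      rw [hcoll]
      rw [pvPop_id _ (fun a hma => by
        rw [List.getLast?_append_of_ne_nil _ hrun.1, hx] at hma
        have hxa : x = a := by simpa using hma
        subst hxa
        have := hrun.2 x (List.mem_of_getLast? hx)
        rw [this, hb])]
      rw [List.flatMap_append, List.flatMap_cons, List.flatMap_nil, List.append_nil, hcoll]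

lemma pvMain (lines : List String) :
    PySem.Str.join "\n" (pvPopTrailing (lines.foldl (fun cleaned line =>
      if PySem.Str.strip line == "" && !cleaned.isEmpty &&
          (match cleaned.getLast? with
           | some p => PySem.Str.strip p == ""
           | none => false) then cleaned
      else cleaned ++ [line]) [])) =
    PySem.Str.join "\n"
      ((match (lines.foldl pvStepB []).getLast? with
        | some (true, _) => (lines.foldl pvStepB []).dropLast
        | _ => lines.foldl pvStepB []).foldl
        (fun (out : List String) (g : Bool × List String) =>
          out ++ (if g.1 then g.2.take 1 else g.2)) []) := by
  have hG := pvFoldB_char lines [] pvWf_nil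
  set G := lines.foldl pvStepB [] with hGdef
  have hflat : G.flatMap (·.2) = lines := by simpa using hG.2
  congr 1
  rw [pvColl_foldA lines []]
  simp only [List.getLast?_nil, List.nil_append]
  have hcollrun : pvColl none lines = G.flatMap pvCollapseRun := by
    conv_lhs => rw [← hflat]
    exact pvRuns G none hG.1 (fun g _ h => by simp [pvOptBlank] at h)
  rw [hcollrun, pvPop_runs G hG.1]
  rw [PySem.List.foldl_append_eq_flatMap]
  rfl

-- ===== VERDICT (by name: the statement is the Claim_ definition above) =====
theorem l5k_unescape_comment_py_spec : Claim_equal_l5k_unescape_comment_py := by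
  intro raw _
  show l5k_unescape_comment_py raw = l5k_unescape_comment_py_alt raw
  unfold l5k_unescape_comment_py l5k_unescape_comment_py_alt
  simp only [List.foldl_cons, List.foldl_nil]
  exact pvMain _
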